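-- pv_equiv track=rewrite | github.com/NaghiAliyev/PragmatechFoundationProject | Tasks/PythonTasks/Task-Week08-day05/CodeTasks/task_6.py | arrPrinter
-- ===== SOURCE A (Python) =====
-- def arrPrinter(arr):
--     oddIndex = []
--     for i in range(1,len(arr),2):
--         element = arr[i]
--         oddIndex.append(element)
--     for i in range(1,len(oddIndex),2):
--         arr.pop(i)
--     return arr
-- ===== SOURCE B (Python) =====
-- def arrPrinter(arr):
--     # Single pass: A ends up deleting original indices 1, 4, 7, ... (len(arr)//4 of them).
--     t = len(arr) // 4
--     result = [x for i, x in enumerate(arr) if 3 * t <= i or i % 3 != 1]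
--     arr[:] = result  # A mutates arr in place; preserve that side effect
--     return arr
-- ===== Notes on version B (the rewrite author's own statement) =====
-- stated objective: faster
-- what changed: Replaces the quadratic loop of repeated list.pop(i) calls on the shifting list by a single enumerate pass that skips exactly the original indices 1,4,7,... (len(arr)//4 of them).
import Mathlib
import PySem

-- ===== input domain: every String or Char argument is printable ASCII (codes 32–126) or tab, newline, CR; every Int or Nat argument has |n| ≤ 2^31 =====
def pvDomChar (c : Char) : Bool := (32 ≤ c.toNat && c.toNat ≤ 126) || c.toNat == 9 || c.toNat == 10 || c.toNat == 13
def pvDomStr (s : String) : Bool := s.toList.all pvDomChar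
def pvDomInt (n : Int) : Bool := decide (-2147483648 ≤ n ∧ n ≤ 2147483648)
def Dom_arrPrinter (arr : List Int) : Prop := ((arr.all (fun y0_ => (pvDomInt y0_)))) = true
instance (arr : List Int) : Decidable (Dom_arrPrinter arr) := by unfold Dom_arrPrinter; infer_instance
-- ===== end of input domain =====

-- B replaces A's quadratic repeated-pop loop by one linear pass skipping original indices
-- 1,4,7,… (len//4 of them); equivalence is about the returned value (A mutates arr in place,
-- B's Python does the same via arr[:] = …).

-- ===== PORT A =====
-- arr.pop(i) → PySem.List.pop?; the 'none' branch (Python's IndexError) is never reached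
-- on any input, since the popped indices are always in range (proved below).
def arrPrinter (arr : List Int) : List Int :=
  let oddIndex : List Int :=
    (PySem.List.pyRange 1 (arr.length : Int) 2).foldl
      (fun acc i => acc ++ [PySem.List.pyGetD arr i 0]) []
  (PySem.List.pyRange 1 (oddIndex.length : Int) 2).foldl
    (fun a i => match PySem.List.pop? a i with
                | some p => p.2
                | none => a) arr

-- ===== PORT B =====
-- i % 3 with i ≥ 0 and positive modulus: Python's % = PySem.Int.mod (fmod), exact here.
def arrPrinter_alt (arr : List Int) : List Int :=
  let t : Int := PySem.Int.floordiv (arr.length : Int) 4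
  ((PySem.List.enumerate arr 0).filter
      (fun p => decide (3 * t ≤ p.1) || !(decide (PySem.Int.mod p.1 3 = 1)))).map (fun p => p.2)

-- ===== PRECONDITION & SPEC =====
def Spec_arrPrinter (arr : List Int) (out : List Int) : Prop := out = arrPrinter_alt arr
instance (arr : List Int) (out : List Int) : Decidable (Spec_arrPrinter arr out) := by unfold Spec_arrPrinter; infer_instance

-- ===== CLAIM (what is proved, stated in full; the proofs are below) =====
def Claim_equal_arrPrinter : Prop := ∀ (arr : List Int), Dom_arrPrinter arr → Spec_arrPrinter arr (arrPrinter arr)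

-- ===== LEMMAS AND PROOFS =====

-- the common shape: remove the middle element of each of the first k groups of three
def pvGrp : Nat → List Int → List Int
  | 0, l => l
  | k+1, a :: _ :: c :: r => a :: c :: pvGrp k r
  | _+1, l => l

def pvPopAt (l : List Int) (i : Int) : List Int :=
  match PySem.List.pop? l i with
  | some p => p.2
  | none => l

theorem pv_pop?_succ_cons (j : Nat) (x : Int) (xs : List Int) :
    PySem.List.pop? (x::xs) ((j:Int)+1) = (PySem.List.pop? xs (j:Int)).map (fun p => (p.1, x::p.2)) := by
  unfold PySem.List.pop? PySem.List.pyIdx?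
  by_cases h : j < xs.length
  · have h0 : (0:Int) ≤ (j:Int)+1 := by positivity
    simp [h, h0]
  · simp [h]; omega

theorem pvPopAt_cons_succ (j : Nat) (x : Int) (xs : List Int) :
    pvPopAt (x::xs) ((j:Int)+1) = x :: pvPopAt xs (j:Int) := by
  unfold pvPopAt
  rw [pv_pop?_succ_cons]
  cases PySem.List.pop? xs (j:Int) <;> simp

-- the A-side fold over pop indices 1, 3, 5, …
def pvF (k : Nat) (l : List Int) : List Int :=
  (List.range k).foldl (fun (a : List Int) (j : Nat) => pvPopAt a (2*(j:Int)+1)) l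

theorem pvF_shift (k : Nat) (x y : Int) (r : List Int) :
    (List.range k).foldl (fun (a : List Int) (j : Nat) => pvPopAt a (2*(j:Int)+3)) (x :: y :: r)
      = x :: y :: pvF k r := by
  induction k with
  | zero => simp [pvF]
  | succ k ih =>
    have e1 : (2*((k:Nat):Int)+3) = ((2*k+2 : Nat) : Int) + 1 := by push_cast; ring
    have e2 : ((2*k+2 : Nat) : Int) = ((2*k+1 : Nat) : Int) + 1 := by push_cast; ring
    have e3 : ((2*k+1 : Nat) : Int) = 2*((k:Nat):Int)+1 := by push_cast; ring
    simp only [List.range_succ, List.foldl_append, List.foldl_cons, List.foldl_nil, ih, pvF]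
    rw [e1, pvPopAt_cons_succ, e2, pvPopAt_cons_succ, e3]

theorem pvF_eq_grp : ∀ (k : Nat) (l : List Int), 3*k ≤ l.length → pvF k l = pvGrp k l := by
  intro k
  induction k with
  | zero => intro l _; simp [pvF, pvGrp]
  | succ k ih =>
    intro l hl
    match l, hl with
    | a :: b :: c :: r, hl =>
      have hr : 3*k ≤ r.length := by simp at hl; omega
      have h1 : pvPopAt (a :: b :: c :: r) 1 = a :: c :: r := by
        rw [show (1:Int) = ((0:Nat):Int) + 1 by norm_num, pvPopAt_cons_succ]
        simp only [Nat.cast_zero, pvPopAt, PySem.List.pop?_zero_cons]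
      have step : pvF (k+1) (a :: b :: c :: r)
          = (List.range k).foldl (fun (x : List Int) (j : Nat) => pvPopAt x (2*((j:Int)+1)+1))
              (pvPopAt (a :: b :: c :: r) (2*((0:Nat):Int)+1)) := by
        unfold pvF
        rw [List.range_succ_eq_map, List.foldl_cons, List.foldl_map]
        simp only [Nat.succ_eq_add_one, Nat.cast_add, Nat.cast_one]
      have hfun : (fun (x : List Int) (j : Nat) => pvPopAt x (2*((j:Int)+1)+1))
          = (fun (x : List Int) (j : Nat) => pvPopAt x (2*(j:Int)+3)) := by
        funext x j
        rw [show (2*((j:Int)+1)+1) = 2*(j:Int)+3 by ring]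
      rw [step, hfun]
      rw [show (2*((0:Nat):Int)+1) = 1 by norm_num, h1]
      rw [pvF_shift k a c r, ih r hr]
      simp [pvGrp]

theorem pv_pyRange_two (m : Nat) :
    PySem.List.pyRange 1 (m : Int) 2 = (List.range (m/2)).map (fun (k : Nat) => 1 + 2*(k:Int)) := by
  rw [PySem.List.pyRange_of_pos 1 (m:Int) (by norm_num)]
  rw [show (if (1:Int) < (m:Int) then (((m:Int) - 1 + 2 - 1)/2).toNat else 0) = m/2 by
    split_ifs with h <;> omega]

theorem pvA_eq_grp (arr : List Int) : arrPrinter arr = pvGrp (arr.length/4) arr := by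
  unfold arrPrinter
  rw [PySem.List.foldl_append_singleton_eq_map]
  simp only [List.nil_append, List.length_map]
  rw [pv_pyRange_two arr.length]
  simp only [List.length_map, List.length_range]
  rw [pv_pyRange_two (arr.length/2), List.foldl_map]
  have hfun : (fun (x : List Int) (k : Nat) =>
        (match PySem.List.pop? x (1 + 2*(k:Int)) with
         | some p => p.2
         | none => x))
      = (fun (x : List Int) (j : Nat) => pvPopAt x (2*(j:Int)+1)) := by
    funext x k
    unfold pvPopAt
    rw [show (1 + 2*(k:Int)) = 2*(k:Int)+1 by ring]
  rw [hfun]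
  rw [show arr.length/2/2 = arr.length/4 by omega]
  have := pvF_eq_grp (arr.length/4) arr (by omega)
  unfold pvF at this
  exact this

theorem pv_mod3 (i : Int) : PySem.Int.mod i 3 = i % 3 := by
  unfold PySem.Int.mod
  rw [Int.fmod_eq_emod]
  simp

theorem pvB_filter_eq_grp : ∀ (t : Nat) (l : List Int) (s : Nat) (T : Int),
    T = 3*(t:Int) + 3*(s:Int) → 3*t ≤ l.length →
    ((PySem.List.enumerate l (3*(s:Int))).filter
        (fun p => decide (T ≤ p.1) || !(decide (PySem.Int.mod p.1 3 = 1)))).map (fun p => p.2)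
      = pvGrp t l := by
  intro t
  induction t with
  | zero =>
    intro l s T hT _
    have hall : ∀ p ∈ PySem.List.enumerate l (3*(s:Int)),
        (decide (T ≤ p.1) || !(decide (PySem.Int.mod p.1 3 = 1))) = true := by
      intro p hp
      rcases (PySem.List.mem_enumerate_iff _ _ _).1 hp with ⟨k, hk, rfl⟩
      simp only [Bool.or_eq_true, decide_eq_true_eq]
      left; omega
    rw [List.filter_eq_self.mpr hall, PySem.List.map_snd_enumerate]
    rfl
  | succ t ih =>
    intro l s T hT hl
    match l, hl with
    | a :: b :: c :: r, hl =>
      have hr : 3*t ≤ r.length := by simp at hl; omega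
      have hmod0 : PySem.Int.mod (3*(s:Int)) 3 = 0 := by
        rw [pv_mod3]; omega
      have hmod1 : PySem.Int.mod (3*(s:Int)+1) 3 = 1 := by
        rw [pv_mod3]; omega
      have hmod2 : PySem.Int.mod (3*(s:Int)+1+1) 3 = 2 := by
        rw [pv_mod3]; omega
      have hT1 : ¬ (T ≤ 3*(s:Int)+1) := by push_cast at hT; omega
      simp only [PySem.List.enumerate_cons, List.filter_cons]
      rw [hmod0, hmod1, hmod2]
      simp only [hT1, decide_eq_true_eq, Bool.or_eq_true]
      norm_num
      rw [show (3*(s:Int)+1+1+1) = 3*(((s+1 : Nat)):Int) by push_cast; ring]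
      have tail := ih r (s+1) T (by push_cast at hT ⊢; omega) hr
      simp only [pv_mod3] at tail
      rw [tail]
      simp [pvGrp]

theorem pvB_eq_grp (arr : List Int) : arrPrinter_alt arr = pvGrp (arr.length/4) arr := by
  unfold arrPrinter_alt
  have hfd : PySem.Int.floordiv (arr.length : Int) 4 = ((arr.length/4 : Nat) : Int) := by
    unfold PySem.Int.floordiv
    rw [Int.fdiv_eq_ediv]
    simp
  rw [hfd]
  have := pvB_filter_eq_grp (arr.length/4) arr 0 (3*((arr.length/4 : Nat):Int))
    (by push_cast; ring) (by omega)
  rw [show (3*((0:Nat):Int)) = 0 by norm_num] at this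
  exact this

-- ===== VERDICT (by name: the statement is the Claim_ definition above) =====
theorem arrPrinter_spec : Claim_equal_arrPrinter := by
  intro arr _
  unfold Spec_arrPrinter
  rw [pvA_eq_grp, pvB_eq_grp]
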